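-- pv_equiv track=rewrite | github.com/logolol/CyberAgent | src/agents/enum_vuln_agent.py | _format_rag
-- ===== SOURCE A (Python) =====
-- from typing import Any
--
-- def _format_rag(results: list[dict[str, Any]], max_chars: int = 500) -> str:
--     """Compact formatting for RAG snippets."""
--     if not results:
--         return ""
--     chunks: list[str] = []
--     total = 0
--     for item in results:
--         text = str(item.get("text", "")).replace("\n", " ")[:150]
--         source = str(item.get("source_collection", "rag"))
--         line = f"[{source}] {text}"
--         if total + len(line) > max_chars:
--             break
--         chunks.append(line)
--         total += len(line)
--     return "\n".join(chunks)
-- ===== SOURCE B (Python) =====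
-- def _format_rag(results: list, max_chars: int = 500) -> str:
--     """Format every item, build a prefix-sum table of line lengths, and
--     binary-search the table for the cutoff index instead of scanning greedily."""
--     lines = [
--         "[{}] {}".format(
--             str(item.get("source_collection", "rag")),
--             str(item.get("text", "")).replace("\n", " ")[:150],
--         )
--         for item in results
--     ]
--     prefix = [0]
--     for line in lines:
--         prefix.append(prefix[-1] + len(line))
--     # largest k with prefix[k] <= max_chars (prefix is non-decreasing)
--     lo, hi = 0, len(lines)
--     while lo < hi:
--         mid = (lo + hi + 1) // 2
--         if prefix[mid] <= max_chars:
--             lo = mid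
--         else:
--             hi = mid - 1
--     return "\n".join(lines[:lo])
-- ===== Notes on version B (the rewrite author's own statement) =====
-- stated objective: alternative
-- what changed: B formats all lines, builds a prefix-sum table of their lengths, and locates the cutoff index by binary search over the (non-decreasing) table, instead of A's fused greedy scan that accumulates and breaks on overflow.
import Mathlib
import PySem

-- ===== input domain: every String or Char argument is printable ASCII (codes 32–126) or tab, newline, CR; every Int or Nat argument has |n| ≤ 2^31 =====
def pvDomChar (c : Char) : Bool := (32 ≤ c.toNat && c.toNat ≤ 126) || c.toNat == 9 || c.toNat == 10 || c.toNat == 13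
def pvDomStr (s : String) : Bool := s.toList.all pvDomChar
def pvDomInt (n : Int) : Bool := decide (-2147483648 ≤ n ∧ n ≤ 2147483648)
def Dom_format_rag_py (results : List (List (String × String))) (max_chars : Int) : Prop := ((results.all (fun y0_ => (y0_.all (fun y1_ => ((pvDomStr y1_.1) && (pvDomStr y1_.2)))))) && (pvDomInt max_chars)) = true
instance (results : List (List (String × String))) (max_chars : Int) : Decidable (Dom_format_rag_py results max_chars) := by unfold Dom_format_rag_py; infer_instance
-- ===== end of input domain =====

-- B replaces A's fused greedy scan-with-break by a prefix-sum table of line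
-- lengths plus a binary search for the cutoff index (objective: alternative).

-- ===== PORT A =====
-- item.get(k, dflt) on the association list: first match, else the default
def pvGetD (item : List (String × String)) (k dflt : String) : String :=
  match item with
  | [] => dflt
  | (k', v) :: rest => if k' == k then v else pvGetD rest k dflt

-- line = f"[{source}] {text}" with text = item.get("text","").replace("\n"," ")[:150]
def pvLine (item : List (String × String)) : String :=
  let text := PySem.Str.slice (PySem.Str.replace (pvGetD item "text" "") "\n" " ") none (some 150)
  let source := pvGetD item "source_collection" "rag"
  "[" ++ source ++ "] " ++ text

-- A's for-loop with its break, carried state (chunks, total)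
def goA (max_chars : Int) (items : List (List (String × String)))
    (chunks : List String) (total : Int) : List String :=
  match items with
  | [] => chunks
  | item :: rest =>
      let line := pvLine item
      if total + (PySem.Str.len line : Int) > max_chars then chunks
      else goA max_chars rest (chunks ++ [line]) (total + (PySem.Str.len line : Int))

def format_rag_py (results : List (List (String × String))) (max_chars : Int) : String :=
  if results = [] then ""
  else PySem.Str.join "\n" (goA max_chars results [] 0)

-- ===== PORT B =====
-- the `while lo < hi` binary search; fuel only makes the recursion structural
-- (hi - lo strictly decreases each iteration, so fuel = initial hi suffices);
-- prefix[mid] is always in range in B, so getD is exact here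
def bisectB (pfx : List Int) (max_chars : Int) : Nat → Nat → Nat → Nat
  | 0, lo, _ => lo
  | fuel + 1, lo, hi =>
      if lo < hi then
        let mid := (lo + hi + 1) / 2
        if pfx.getD mid 0 ≤ max_chars then bisectB pfx max_chars fuel mid hi
        else bisectB pfx max_chars fuel lo (mid - 1)
      else lo

def format_rag_py_alt (results : List (List (String × String))) (max_chars : Int) : String :=
  let lines := results.map pvLine
  -- prefix = [0]; for line in lines: prefix.append(prefix[-1] + len(line))
  let pfx := lines.foldl (fun acc l => acc ++ [acc.getLast! + (PySem.Str.len l : Int)]) [0]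
  let lo := bisectB pfx max_chars lines.length 0 lines.length
  PySem.Str.join "\n" (lines.take lo)

-- ===== PRECONDITION & SPEC =====
def Spec_format_rag_py (results : List (List (String × String))) (max_chars : Int) (out : String) : Prop := out = format_rag_py_alt results max_chars
instance (results : List (List (String × String))) (max_chars : Int) (out : String) : Decidable (Spec_format_rag_py results max_chars out) := by unfold Spec_format_rag_py; infer_instance

-- ===== CLAIM (what is proved, stated in full; the proofs are below) =====
def Claim_equal_format_rag_py : Prop := ∀ (results : List (List (String × String))) (max_chars : Int), Dom_format_rag_py results max_chars → Spec_format_rag_py results max_chars (format_rag_py results max_chars)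

-- ===== LEMMAS AND PROOFS =====
-- greedy prefix count (proof-only characterisation of A's loop)
def takeCountB (lines : List String) (total : Int) (max_chars : Int) : Nat :=
  match lines with
  | [] => 0
  | l :: rest =>
      if total + (PySem.Str.len l : Int) ≤ max_chars then
        1 + takeCountB rest (total + (PySem.Str.len l : Int)) max_chars
      else 0

-- cumulative length of the first k lines
def Spre (lines : List String) (k : Nat) : Int :=
  (((lines.map (fun l => (PySem.Str.len l : Int))).take k).sum)

lemma goA_eq_take (max_chars : Int) :
    ∀ (items : List (List (String × String))) (chunks : List String) (total : Int),
      goA max_chars items chunks total =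
        chunks ++ (items.map pvLine).take (takeCountB (items.map pvLine) total max_chars) := by
  intro items
  induction items with
  | nil => intro chunks total; simp [goA, takeCountB]
  | cons item rest ih =>
      intro chunks total
      simp only [goA, takeCountB, List.map_cons]
      by_cases h : total + (PySem.Str.len (pvLine item) : Int) ≤ max_chars
      · rw [if_neg (by omega), if_pos h, ih]
        rw [Nat.add_comm]; simp [List.take_succ_cons, List.append_assoc]
      · rw [if_pos (by omega), if_neg h]
        simp

lemma Spre_nonneg (lines : List String) (k : Nat) : 0 ≤ Spre lines k := by
  apply List.sum_nonneg
  intro x hx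
  have := List.mem_of_mem_take hx
  obtain ⟨l, _, rfl⟩ := List.mem_map.1 this
  exact Int.natCast_nonneg _

lemma tc_le (max_chars : Int) :
    ∀ (lines : List String) (total : Int), takeCountB lines total max_chars ≤ lines.length := by
  intro lines
  induction lines with
  | nil => intro total; simp [takeCountB]
  | cons l rest ih =>
      intro total
      simp only [takeCountB, List.length_cons]
      split_ifs
      · have := ih (total + (PySem.Str.len l : Int)); omega
      · omega

lemma tc_pred (max_chars : Int) :
    ∀ (lines : List String) (total : Int) (j : Nat), 1 ≤ j →
      j ≤ takeCountB lines total max_chars → total + Spre lines j ≤ max_chars := by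
  intro lines
  induction lines with
  | nil => intro total j h1 h2; simp [takeCountB] at h2; omega
  | cons l rest ih =>
      intro total j h1 h2
      simp only [takeCountB] at h2
      by_cases h : total + (PySem.Str.len l : Int) ≤ max_chars
      · rw [if_pos h] at h2
        obtain ⟨j', rfl⟩ : ∃ j', j = j' + 1 := ⟨j - 1, by omega⟩
        simp only [Spre, List.map_cons, List.take_succ_cons, List.sum_cons]
        by_cases hj' : 1 ≤ j'
        · have := ih (total + (PySem.Str.len l : Int)) j' hj' (by omega)
          simp only [Spre] at this; omega
        · have : j' = 0 := by omega
          subst this; simp only [List.take_zero, List.sum_nil, add_zero]; omega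
      · rw [if_neg h] at h2; omega

lemma tc_above (max_chars : Int) :
    ∀ (lines : List String) (total : Int) (j : Nat),
      takeCountB lines total max_chars < j → j ≤ lines.length →
      max_chars < total + Spre lines j := by
  intro lines
  induction lines with
  | nil => intro total j h1 h2; simp at h2; omega
  | cons l rest ih =>
      intro total j h1 h2
      simp only [takeCountB] at h1
      obtain ⟨j', rfl⟩ : ∃ j', j = j' + 1 := ⟨j - 1, by omega⟩
      simp only [Spre, List.map_cons, List.take_succ_cons, List.sum_cons]
      by_cases h : total + (PySem.Str.len l : Int) ≤ max_chars
      · rw [if_pos h] at h1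
        have := ih (total + (PySem.Str.len l : Int)) j' (by omega) (by simpa using h2)
        simp only [Spre] at this; omega
      · have := Spre_nonneg rest j'
        simp only [Spre] at this; omega

-- the python prefix-building loop equals scanl
lemma foldl_pref (xs : List Int) :
    ∀ (init : List Int) (s : Int),
      xs.foldl (fun acc x => acc ++ [acc.getLast! + x]) (init ++ [s]) =
        init ++ List.scanl (· + ·) s xs := by
  induction xs with
  | nil => intro init s; simp [List.scanl_nil]
  | cons x rest ih =>
      intro init s
      simp only [List.foldl_cons, List.scanl_cons]
      have hlast : (init ++ [s]).getLast! = s := by simp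
      rw [hlast, List.append_assoc]
      have := ih (init ++ [s]) (s + x)
      simpa [List.append_assoc] using this

lemma scanl_getD (xs : List Int) :
    ∀ (s : Int) (k : Nat), k ≤ xs.length →
      (List.scanl (· + ·) s xs).getD k 0 = s + (xs.take k).sum := by
  induction xs with
  | nil =>
      intro s k hk
      have hk0 : k = 0 := by simpa using hk
      subst hk0; simp [List.scanl_nil]
  | cons x rest ih =>
      intro s k hk
      cases k with
      | zero => simp [List.scanl_cons]
      | succ k' =>
          simp only [List.scanl_cons, List.getD_cons_succ, List.take_succ_cons, List.sum_cons]
          rw [ih (s + x) k' (by simpa using hk)]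
          ring

lemma pref_getD (lines : List String) (k : Nat) (hk : k ≤ lines.length) :
    (lines.foldl (fun acc l => acc ++ [acc.getLast! + (PySem.Str.len l : Int)]) [0]).getD k 0 =
      Spre lines k := by
  have h1 : lines.foldl (fun acc l => acc ++ [acc.getLast! + (PySem.Str.len l : Int)]) [0] =
      List.scanl (· + ·) 0 (lines.map (fun l => (PySem.Str.len l : Int))) := by
    rw [← List.foldl_map (f := fun l => (PySem.Str.len l : Int))
        (g := fun acc x => acc ++ [acc.getLast! + x])]
    have := foldl_pref (lines.map (fun l => (PySem.Str.len l : Int))) [] 0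
    simpa using this
  rw [h1, scanl_getD _ 0 k (by simpa using hk)]
  simp [Spre]

lemma bisect_eq (lines : List String) (max_chars : Int) (g : Nat)
    (H1 : ∀ j, 1 ≤ j → j ≤ g → Spre lines j ≤ max_chars)
    (H2 : ∀ j, g < j → j ≤ lines.length → max_chars < Spre lines j) :
    ∀ (fuel lo hi : Nat), hi - lo ≤ fuel → lo ≤ g → g ≤ hi → hi ≤ lines.length →
      bisectB (lines.foldl (fun acc l => acc ++ [acc.getLast! + (PySem.Str.len l : Int)]) [0])
        max_chars fuel lo hi = g := by
  intro fuel
  induction fuel with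
  | zero => intro lo hi hf h1 h2 h3; simp only [bisectB]; omega
  | succ fuel ih =>
      intro lo hi hf h1 h2 h3
      simp only [bisectB]
      by_cases hlt : lo < hi
      · rw [if_pos hlt]
        have hmid1 : lo < (lo + hi + 1) / 2 := by omega
        have hmid2 : (lo + hi + 1) / 2 ≤ hi := by omega
        rw [pref_getD lines ((lo + hi + 1) / 2) (by omega)]
        by_cases hp : Spre lines ((lo + hi + 1) / 2) ≤ max_chars
        · rw [if_pos hp]
          have hmg : (lo + hi + 1) / 2 ≤ g := by
            by_contra hc
            exact absurd hp (not_le.2 (H2 _ (by omega) (by omega)))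
          exact ih _ _ (by omega) hmg h2 h3
        · rw [if_neg hp]
          have hmg : g ≤ (lo + hi + 1) / 2 - 1 := by
            by_contra hc
            exact hp (H1 _ (by omega) (by omega))
          exact ih _ _ (by omega) h1 hmg (by omega)
      · rw [if_neg hlt]; omega

-- ===== VERDICT (by name: the statement is the Claim_ definition above) =====
theorem format_rag_py_spec : Claim_equal_format_rag_py := by
  intro results max_chars _
  unfold Spec_format_rag_py format_rag_py format_rag_py_alt
  have hmain : PySem.Str.join "\n"
      ((results.map pvLine).take
        (bisectB ((results.map pvLine).foldl
            (fun acc l => acc ++ [acc.getLast! + (PySem.Str.len l : Int)]) [0])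
          max_chars (results.map pvLine).length 0 (results.map pvLine).length)) =
      PySem.Str.join "\n"
        ((results.map pvLine).take (takeCountB (results.map pvLine) 0 max_chars)) := by
    congr 1
    have hb := bisect_eq (results.map pvLine) max_chars
      (takeCountB (results.map pvLine) 0 max_chars)
      (fun j h1 h2 => by have := tc_pred max_chars (results.map pvLine) 0 j h1 h2; omega)
      (fun j h1 h2 => by have := tc_above max_chars (results.map pvLine) 0 j h1 h2; omega)
      (results.map pvLine).length 0 (results.map pvLine).length
      (by omega) (by omega) (tc_le max_chars _ 0) (le_refl _)
    rw [hb]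
  rcases results with _ | ⟨item, rest⟩
  · rfl
  · rw [if_neg (by simp), goA_eq_take]
    simp only [List.nil_append]
    exact (hmain).symm
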